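-- pv_equiv track=rewrite | github.com/hyeonjeong-ko/algorithm-challenges | programmers/Python/P340212_퍼즐_게임_챌린지.py | solution
-- ===== SOURCE A (Python) =====
-- def solution(diffs, times, limit):
--     answer = 0
--     N = len(diffs)
--
--     def time_by_level(k):
--         idx = 0
--         time = 0
--         while idx < N:
--             if diffs[idx] <= k:
--                 time+=times[idx]
--             else:
--                 wrong = diffs[idx] - k
--                 time+=(times[idx] + times[idx-1]) * wrong + times[idx]
--             idx+=1
--         return time
--
--     levels = [i for i in range(1, 100_000 + 1)]
--
--     l = 1 # 숙련도 최소값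
--     r = max(diffs) # 숙련도 최대값
--     ans = 0
--
--     while l <= r:
--         m = (l + r) // 2
--         taken_time = time_by_level(m)
--
--         if taken_time > limit:
--             l = m + 1
--         else:
--             ans = m  # 조건을 만족할 때 정답 후보 갱신
--             r = m - 1
--     return ans
-- ===== SOURCE B (Python) =====
-- def solution(diffs, times, limit):
--     # rotated times: prev[i] == times[i-1] with Python's wrap at i == 0
--     prev = times[-1:] + times[:-1]
--
--     def total_time(k):
--         return sum(t if d <= k else t + (t + pt) * (d - k)
--                    for d, t, pt in zip(diffs, times, prev))
--
--     def search(lo, hi, best):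
--         if lo > hi:
--             return best
--         m = (lo + hi) // 2
--         if total_time(m) > limit:
--             return search(m + 1, hi, best)
--         return search(lo, m - 1, m)
--
--     return search(1, max(diffs), 0)
-- ===== Notes on version B (the rewrite author's own statement) =====
-- stated objective: alternative
-- what changed: The index-based while loop computing the level time is replaced by a one-shot rotation of `times` plus a generator-sum over zip, and the iterative `while l <= r` binary search is replaced by a recursive divide-and-conquer helper carrying the best feasible level.
import Mathlib
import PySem

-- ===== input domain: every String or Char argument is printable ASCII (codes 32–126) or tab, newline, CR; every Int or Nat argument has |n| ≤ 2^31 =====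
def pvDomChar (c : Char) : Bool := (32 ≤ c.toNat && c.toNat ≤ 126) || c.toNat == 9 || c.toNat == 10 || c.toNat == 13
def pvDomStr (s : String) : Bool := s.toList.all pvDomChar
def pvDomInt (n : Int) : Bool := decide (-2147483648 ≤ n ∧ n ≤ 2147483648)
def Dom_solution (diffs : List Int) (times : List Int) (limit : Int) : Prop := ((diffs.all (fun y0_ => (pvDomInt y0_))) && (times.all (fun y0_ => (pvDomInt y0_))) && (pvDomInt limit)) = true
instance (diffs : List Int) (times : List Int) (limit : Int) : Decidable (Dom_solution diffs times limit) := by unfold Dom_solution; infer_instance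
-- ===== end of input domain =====

-- B replaces A's index-loop time computation by a rotate-and-zip sum and A's iterative
-- binary search by a recursive divide-and-conquer helper; same results (objective: alternative).


-- ===== PORT A =====
-- the inner `while idx < N` loop of time_by_level
def tblA (diffs times : List Int) (N : Nat) (k : Int) (idx : Nat) (time : Int) : Int :=
  if _h : idx < N then
    let d := (PySem.List.pyGet? diffs (idx : Int)).getD 0
    let t := (PySem.List.pyGet? times (idx : Int)).getD 0
    let time' := if d ≤ k then time + t
      else time + (t + (PySem.List.pyGet? times ((idx : Int) - 1)).getD 0) * (d - k) + t
    tblA diffs times N k (idx + 1) time'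
  else time
termination_by N - idx

-- the `while l <= r` binary-search loop
def bsA (diffs times : List Int) (N : Nat) (limit l r ans : Int) : Int :=
  if h : l ≤ r then
    let m := PySem.Int.floordiv (l + r) 2
    let takenTime := tblA diffs times N m 0 0
    if takenTime > limit then bsA diffs times N limit (m + 1) r ans
    else bsA diffs times N limit l (m - 1) m
  else ans
termination_by (r + 1 - l).toNat
decreasing_by
  · have := PySem.Int.floordiv_two_mid_bounds h; omega
  · have := PySem.Int.floordiv_two_mid_bounds h; omega

def solution (diffs : List Int) (times : List Int) (limit : Int) : Int :=
  let N := diffs.length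
  let _levels := PySem.List.pyRange 1 (100000 + 1) 1
  let r := (PySem.List.max? diffs (fun x => x)).getD 0
  bsA diffs times N limit 1 r 0

-- ===== PORT B =====
def timeB (diffs times prev : List Int) (k : Int) : Int :=
  ((diffs.zip (times.zip prev)).map (fun p =>
    if p.1 ≤ k then p.2.1 else p.2.1 + (p.2.1 + p.2.2) * (p.1 - k))).sum

def searchB (diffs times prev : List Int) (limit lo hi best : Int) : Int :=
  if h : lo > hi then best
  else
    let m := PySem.Int.floordiv (lo + hi) 2
    if timeB diffs times prev m > limit then searchB diffs times prev limit (m + 1) hi best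
    else searchB diffs times prev limit lo (m - 1) m
termination_by (hi + 1 - lo).toNat
decreasing_by
  · have := PySem.Int.floordiv_two_mid_bounds (by omega : lo ≤ hi); omega
  · have := PySem.Int.floordiv_two_mid_bounds (by omega : lo ≤ hi); omega

def solution_alt (diffs : List Int) (times : List Int) (limit : Int) : Int :=
  let prev := PySem.List.slice times (some (-1)) none ++ PySem.List.slice times none (some (-1))
  searchB diffs times prev limit 1 ((PySem.List.max? diffs (fun x => x)).getD 0) 0

-- ===== PRECONDITION & SPEC =====
-- A raises on empty diffs (max of empty) and, whenever some difficulty is ≥ 1 (so the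
-- search loop runs), on times shorter than diffs (IndexError); Pre_ excludes exactly those.
def Pre_solution (diffs : List Int) (times : List Int) (limit : Int) : Prop :=
  diffs ≠ [] ∧ (diffs.length ≤ times.length ∨ ∀ d ∈ diffs, d < 1)
instance (diffs : List Int) (times : List Int) (limit : Int) : Decidable (Pre_solution diffs times limit) := by unfold Pre_solution; infer_instance

def pvWitness_solution : List Int × List Int × Int := ([1, 4, 3], [2, 3, 5], 30)

def Spec_solution (diffs : List Int) (times : List Int) (limit : Int) (out : Int) : Prop := out = solution_alt diffs times limit
instance (diffs : List Int) (times : List Int) (limit : Int) (out : Int) : Decidable (Spec_solution diffs times limit out) := by unfold Spec_solution; infer_instance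

-- ===== CLAIM (what is proved, stated in full; the proofs are below) =====
def Claim_equal_solution : Prop := ∀ (diffs : List Int) (times : List Int) (limit : Int), Dom_solution diffs times limit → Pre_solution diffs times limit → Spec_solution diffs times limit (solution diffs times limit)

-- ===== LEMMAS AND PROOFS =====

-- the rotated list times[-1:] + times[:-1] agrees with Python's wrap-around indexing times[i-1]
lemma prev_length (times : List Int) (h1 : 1 ≤ times.length) :
    (PySem.List.slice times (some (-1)) none ++ PySem.List.slice times none (some (-1))).length = times.length := by
  rw [PySem.List.slice_from_neg_one, PySem.List.slice_to_neg_one]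
  simp only [List.length_append, List.length_drop, List.length_dropLast]
  omega

lemma prev_getElem? (times : List Int) (i : Nat) (hi : i < times.length) :
    (PySem.List.slice times (some (-1)) none ++ PySem.List.slice times none (some (-1)))[i]? =
      (if i = 0 then times[times.length - 1]? else times[i - 1]?) := by
  rw [PySem.List.slice_from_neg_one, PySem.List.slice_to_neg_one]
  rcases Nat.eq_zero_or_pos i with h0 | h0
  · subst h0
    rw [if_pos rfl, List.getElem?_append_left (by simp; omega)]
    simp
  · rw [if_neg (by omega), List.getElem?_append_right (by simp; omega)]
    simp only [List.getElem?_dropLast, List.length_drop]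
    rw [if_pos (by omega)]
    congr 1
    omega

-- the A-side while loop equals acc + sum of B's mapped zip, for any rotation prev with prev[i] = times[i-1 mod len]
lemma tbl_eq_sum (diffs times prev : List Int) (hne : diffs ≠ [])
    (hlen : diffs.length ≤ times.length)
    (hplen : prev.length = times.length)
    (hpget : ∀ i : Nat, i < times.length →
      prev[i]? = (if i = 0 then times[times.length - 1]? else times[i - 1]?)) (k : Int) :
    ∀ idx time, tblA diffs times diffs.length k idx time =
      time + (((diffs.zip (times.zip prev)).drop idx).map
        (fun p => if p.1 ≤ k then p.2.1 else p.2.1 + (p.2.1 + p.2.2) * (p.1 - k))).sum := by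
  intro idx time
  have htn : 1 ≤ times.length := by
    have : 1 ≤ diffs.length := by cases diffs <;> simp_all
    omega
  have hzlen : (diffs.zip (times.zip prev)).length = diffs.length := by
    simp [List.length_zip, hplen]; omega
  fun_induction tblA diffs times diffs.length k idx time with
  | case1 idx time h d t time' ih =>
    have hit : idx < times.length := by omega
    have hip : idx < prev.length := by omega
    have hd : d = diffs[idx] := by
      simp only [d, PySem.List.pyGet?_natCast, List.getElem?_eq_getElem h, Option.getD_some]
    have ht : t = times[idx] := by
      simp only [t, PySem.List.pyGet?_natCast, List.getElem?_eq_getElem hit, Option.getD_some]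
    have hz : (diffs.zip (times.zip prev)).drop idx =
        (diffs[idx], times[idx], prev[idx]) ::
          (diffs.zip (times.zip prev)).drop (idx + 1) := by
      rw [List.drop_eq_getElem_cons (by omega)]
      simp [List.getElem_zip]
    have htp : (PySem.List.pyGet? times ((idx : Int) - 1)).getD 0 = prev[idx] := by
      have hp := hpget idx hit
      rcases Nat.eq_zero_or_pos idx with h0 | h0
      · subst h0
        rw [if_pos rfl] at hp
        show (PySem.List.pyGet? times (-1)).getD 0 = _
        rw [PySem.List.pyGet?_neg_one, List.getLast?_eq_getElem?]
        rw [List.getElem?_eq_getElem hip] at hp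
        rw [← hp]
        simp
      · rw [if_neg (by omega)] at hp
        have hc : (idx : Int) - 1 = ((idx - 1 : Nat) : Int) := by omega
        rw [hc, PySem.List.pyGet?_natCast, ← hp, List.getElem?_eq_getElem hip]
        simp
    rw [ih, hz]
    simp only [List.map_cons, List.sum_cons, time', hd, ht, htp]
    split <;> ring
  | case2 idx time h =>
    have : (diffs.zip (times.zip prev)).drop idx = [] := by
      rw [List.drop_eq_nil_iff]; omega
    simp [this]

lemma bs_eq_search (diffs times prev : List Int) (limit : Int)
    (htbl : ∀ k, tblA diffs times diffs.length k 0 0 = timeB diffs times prev k) :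
    ∀ l r ans, bsA diffs times diffs.length limit l r ans = searchB diffs times prev limit l r ans := by
  intro l r ans
  fun_induction bsA diffs times diffs.length limit l r ans with
  | case1 l r ans h m tt htt ih =>
    rw [searchB, dif_neg (by omega)]
    simp only [← htbl]
    rw [if_pos htt]
    exact ih
  | case2 l r ans h m tt htt ih =>
    rw [searchB, dif_neg (by omega)]
    simp only [← htbl]
    rw [if_neg htt]
    exact ih
  | case3 l r ans h =>
    rw [searchB, dif_pos (by omega)]

-- ===== VERDICT (by name: the statement is the Claim_ definition above) =====
theorem solution_spec : Claim_equal_solution := by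
  intro diffs times limit _hdom hpre
  obtain ⟨hne, hcase⟩ := hpre
  unfold Spec_solution solution solution_alt
  rcases hcase with hlen | hsmall
  · have htn : 1 ≤ times.length := by
      have : 1 ≤ diffs.length := by cases diffs <;> simp_all
      omega
    apply bs_eq_search
    intro k
    rw [tbl_eq_sum diffs times _ hne hlen (prev_length times htn)
      (fun i hi => prev_getElem? times i hi) k 0 0]
    simp [timeB]
  · -- every difficulty < 1: both searches return immediately with 0
    have hr : (PySem.List.max? diffs (fun x => x)).getD 0 < 1 := by
      rcases hmax : PySem.List.max? diffs (fun x => x) with _ | m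
      · rw [PySem.List.max?_eq_none_iff] at hmax; exact absurd hmax hne
      · have := PySem.List.max?_mem hmax
        simpa using hsmall m this
    rw [bsA, dif_neg (by omega), searchB, dif_pos (by omega)]
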